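-- pv_equiv track=rewrite | github.com/DuarteCorreia96/IASD | sudoku/aula1819_2.py | solve
-- ===== SOURCE A (Python) =====
-- def solve(board):
--     free = find_free_slot(board)
--     if free is None:
--         return board
--     else:
--         # i = free[0]
--         # j = free[1]
--         (i, j) = free
--         for n in range(1, 10):
--             board[i][j] = n
--             if valid(i, j, board):
--                 sub = solve(board)
--                 if sub is not None:
--                     return sub
--         board[i][j] = 0
--         return None
--
-- def find_free_slot(board):
--     for (i,row) in enumerate(board):
--         for (j,value) in enumerate(row):
--             if value==0:
--                 return (i, j)
--     return None
--
-- def valid(i, j, board):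
--     # check row
--     if repeated(board[i]):
--         return False
--     # check column
--     col = [row[j] for row in board]
--     if repeated(col):
--         return False
--     # check sub-square
--     oi = 3*(i//3)
--     oj = 3*(j//3)
--     l = [ board[oi+di][oj+dj] for di in range(3) for dj in range(3) ]
--     # l = []
--     # for di in range(3):
--     #     for dj in range(3):
--     #         l.append(board[oi+di][oj+dj])
--     if repeated(l):
--         return False
--     # all is good
--     return True
--
-- def repeated(line):
--     f = [n for n in line if n!=0]
--     return len(set(f))!=len(f)
-- ===== SOURCE B (Python) =====
-- # Iterative explicit-stack backtracking instead of A's recursion: the empty cells are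
-- # collected once in row-major order, then a while loop with a todo/done stack walks
-- # them, trying digits and backtracking by popping.  Mutates `board` in place like A
-- # (filled on success, restored to its zeros on failure); same return object/values.
--
-- def solve(board):
--     todo = [(i, j) for i, row in enumerate(board)
--                    for j, v in enumerate(row) if v == 0]
--     todo.reverse()               # next cell to fill sits at the end
--     done = []                    # (i, j, digit) for cells already placed
--     n = 1                        # next digit to try at the current cell
--     while todo:
--         i, j = todo[-1]
--         while n <= 9:
--             board[i][j] = n
--             if valid(i, j, board):
--                 break
--             n += 1
--         if n <= 9:
--             done.append(todo.pop() + (n,))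
--             n = 1
--         else:
--             board[i][j] = 0
--             if not done:
--                 return None
--             pi, pj, pn = done.pop()
--             todo.append((pi, pj))
--             n = pn + 1
--     return board
--
-- def valid(i, j, board):
--     # check row
--     if repeated(board[i]):
--         return False
--     # check column
--     col = [row[j] for row in board]
--     if repeated(col):
--         return False
--     # check sub-square
--     oi = 3*(i//3)
--     oj = 3*(j//3)
--     l = [ board[oi+di][oj+dj] for di in range(3) for dj in range(3) ]
--     if repeated(l):
--         return False
--     # all is good
--     return True
--
-- def repeated(line):
--     f = [n for n in line if n!=0]
--     return len(set(f))!=len(f)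
-- ===== Notes on version B (the rewrite author's own statement) =====
-- stated objective: alternative
-- what changed: A's recursive solver that rescans the whole board for the next free slot at every node is replaced by an iterative backtracker: the empty cells are collected once, and an explicit todo/done stack with a digit counter walks them, backtracking by popping instead of returning.
import Mathlib
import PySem

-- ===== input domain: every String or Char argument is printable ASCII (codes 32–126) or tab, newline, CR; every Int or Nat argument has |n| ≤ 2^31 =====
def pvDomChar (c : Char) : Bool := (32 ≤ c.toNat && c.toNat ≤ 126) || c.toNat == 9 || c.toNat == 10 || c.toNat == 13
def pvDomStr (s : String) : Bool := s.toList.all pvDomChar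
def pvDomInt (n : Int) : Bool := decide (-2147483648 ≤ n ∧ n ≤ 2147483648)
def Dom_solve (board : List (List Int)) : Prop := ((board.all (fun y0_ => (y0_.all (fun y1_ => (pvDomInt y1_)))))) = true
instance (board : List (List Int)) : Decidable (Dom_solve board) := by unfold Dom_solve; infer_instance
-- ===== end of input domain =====

-- B replaces A's recursive solver (which rescans the board for the next free slot at
-- every node) by an iterative backtracker over the once-collected list of empty cells,
-- driven by an explicit todo/done stack; same return value.  Both Pythons mutate the
-- argument board identically (filled on success, zeros restored on failure); the
-- equivalence proved here is about the RETURN value.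

-- ===== PORT A =====

-- repeated(line): len(set(f)) != len(f) with f the nonzero entries
def pvRepeated (line : List Int) : Bool :=
  let f := line.filter (fun n => decide (n ≠ 0))
  decide ((PySem.Set.ofList f).length ≠ f.length)

-- board[i][j] read; cells reached inside Pre_ are always in range, so getD is exact
def pvCell (b : List (List Int)) (i j : Nat) : Int := (b.getD i []).getD j 0

-- valid(i, j, board): row, column and 3x3 sub-square checks
def pvValid (i j : Nat) (b : List (List Int)) : Bool :=
  if pvRepeated (b.getD i []) then false
  else if pvRepeated (b.map (fun row => row.getD j 0)) then false
  else if pvRepeated ((List.range 3).flatMap (fun di =>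
            (List.range 3).map (fun dj => pvCell b (3*(i/3)+di) (3*(j/3)+dj)))) then false
  else true

-- board[i][j] = v (the in-place mutation, threaded functionally)
def pvPlace (c : Nat × Nat) (v : Int) (b : List (List Int)) : List (List Int) :=
  b.set c.1 ((b.getD c.1 []).set c.2 v)

-- find_free_slot(board): the enumerate loops, with explicit index counters
def pvFindFreeRow (i j : Nat) (row : List Int) : Option (Nat × Nat) :=
  match row with
  | [] => none
  | v :: t => if v = 0 then some (i, j) else pvFindFreeRow i (j+1) t

def pvFindFreeFrom (i : Nat) (rows : List (List Int)) : Option (Nat × Nat) :=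
  match rows with
  | [] => none
  | r :: t =>
    match pvFindFreeRow i 0 r with
    | some p => some p
    | none => pvFindFreeFrom (i+1) t

def pvFindFree (b : List (List Int)) : Option (Nat × Nat) := pvFindFreeFrom 0 b

-- the empties comprehension of B (also reused as A's fuel bound, a totality guard only)
def pvEmptiesRow (i j : Nat) (row : List Int) : List (Nat × Nat) :=
  match row with
  | [] => []
  | v :: t => if v = 0 then (i, j) :: pvEmptiesRow i (j+1) t else pvEmptiesRow i (j+1) t

def pvEmptiesFrom (i : Nat) (rows : List (List Int)) : List (Nat × Nat) :=
  match rows with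
  | [] => []
  | r :: t => pvEmptiesRow i 0 r ++ pvEmptiesFrom (i+1) t

def pvEmpties (b : List (List Int)) : List (Nat × Nat) := pvEmptiesFrom 0 b

-- solve(board), A's recursion; the Nat fuel is only a totality guard (each recursive
-- call fills one zero cell, so (pvEmpties b).length + 1 is proved sufficient below)
mutual
def pvSolveFuel : Nat → List (List Int) → Option (List (List Int))
  | 0, _ => none
  | fuel+1, b =>
    match pvFindFree b with
    | none => some b
    | some (i, j) => pvDigitsA fuel b i j 1
termination_by fuel _ => (fuel, 0)
decreasing_by
  apply Prod.Lex.left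
  exact Nat.lt_succ_self _

def pvDigitsA (fuel : Nat) (b : List (List Int)) (i j n : Nat) : Option (List (List Int)) :=
  if n > 9 then none
  else
    let b' := pvPlace (i, j) (n : Int) b
    if pvValid i j b' then
      match pvSolveFuel fuel b' with
      | some s => some s
      | none => pvDigitsA fuel b' i j (n+1)
    else pvDigitsA fuel b' i j (n+1)
termination_by (fuel, 10 - n)
decreasing_by
  · apply Prod.Lex.right'
    · exact Nat.le_refl _
    · omega
  · apply Prod.Lex.right'
    · exact Nat.le_refl _
    · omega
  · apply Prod.Lex.right'
    · exact Nat.le_refl _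
    · omega
end

def solve (board : List (List Int)) : Option (List (List Int)) :=
  pvSolveFuel ((pvEmpties board).length + 1) board

-- ===== PORT B =====

-- termination measure for the iterative loop: the digit string chosen so far,
-- read as a base-10 number (clamped), only grows along the search
def pvStackVal (done : List ((Nat × Nat) × Nat)) : Nat :=
  done.foldr (fun x acc => min x.2 9 + 10 * acc) 0

def pvNu (tl : Nat) (done : List ((Nat × Nat) × Nat)) (n : Nat) : Nat :=
  min n 10 * 10 ^ tl + 10 ^ (tl+1) * pvStackVal done

-- generic arithmetic helpers over plain variables (so the instantiated proof
-- terms stay small)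
theorem pvArithRow (m v P : Nat) (hm : m ≤ 9) (ih : v + 10 ≤ P) :
    m + 10 * v + 10 ≤ P * 10 := by omega

theorem pvArithNuLe (A B C D P1 Q : Nat) (h1 : P1 ≤ 10 * A) (h2 : B = A * 10)
    (h3 : D = B * C) (h4 : Q + B * 10 ≤ B * C) : P1 + Q ≤ D := by omega

theorem pvArithBack (A V M : Nat) :
    (M + 1) * (A * 10 * 10) + A * 10 * 10 * 10 * V
      = 10 * (A * 10) + A * 10 * 10 * (M + 10 * V) := by ring

theorem pvArithGrow (A V n : Nat) :
    n * (A * 10) + A * 10 * 10 * V + A = 1 * A + A * 10 * (n + 10 * V) := by ring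

theorem pvArithGrow2 (A V n : Nat) :
    n * A + A * 10 * V + A = (n + 1) * A + A * 10 * V := by
  rw [Nat.succ_mul, Nat.add_right_comm]

theorem pvArithSubLt (B x y P : Nat) (h1 : x + P = y) (h2 : y ≤ B) (h3 : 0 < P) :
    B - y < B - x := by omega

theorem pvStackVal_le (done : List ((Nat × Nat) × Nat)) :
    pvStackVal done + 10 ≤ 10 ^ (done.length + 1) := by
  induction done with
  | nil => decide
  | cons x t ih =>
    show min x.2 9 + 10 * pvStackVal t + 10 ≤ 10 ^ (t.length + 1 + 1)
    rw [pow_succ 10 (t.length + 1)]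
    exact pvArithRow (min x.2 9) (pvStackVal t) _ (Nat.min_le_right _ _) ih

theorem pvNu_le (tl : Nat) (done : List ((Nat × Nat) × Nat)) (n : Nat) :
    pvNu tl done n ≤ 10 ^ (tl + done.length + 2) := by
  have hv := pvStackVal_le done
  show min n 10 * 10 ^ tl + 10 ^ (tl + 1) * pvStackVal done ≤ 10 ^ (tl + done.length + 2)
  have h1 : min n 10 * 10 ^ tl ≤ 10 * 10 ^ tl :=
    Nat.mul_le_mul_right _ (Nat.min_le_right _ _)
  have h3 : (10:Nat) ^ (tl + done.length + 2) = 10 ^ (tl + 1) * 10 ^ (done.length + 1) := by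
    rw [← pow_add, Nat.add_succ (tl+1) done.length, Nat.add_right_comm tl 1 done.length]
  have h4 : 10 ^ (tl + 1) * pvStackVal done + 10 ^ (tl + 1) * 10
      ≤ 10 ^ (tl + 1) * 10 ^ (done.length + 1) := by
    rw [← Nat.mul_add]
    exact Nat.mul_le_mul_left _ hv
  exact pvArithNuLe (10 ^ tl) (10 ^ (tl + 1)) (10 ^ (done.length + 1)) _ _ _
    h1 (pow_succ 10 tl) h3 h4

theorem pvNu_backtrack (tl : Nat) (done' : List ((Nat × Nat) × Nat)) (p : Nat × Nat)
    (pd n : Nat) (hn : 9 < n) :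
    pvNu (tl+1+1) done' (pd+1) = pvNu (tl+1) ((p, pd) :: done') n := by
  show min (pd+1) 10 * 10 ^ (tl+1+1) + 10 ^ (tl+1+1+1) * pvStackVal done'
      = min n 10 * 10 ^ (tl+1) + 10 ^ (tl+1+1) * (min pd 9 + 10 * pvStackVal done')
  have h1 : min (pd+1) 10 = min pd 9 + 1 := Nat.succ_min_succ pd 9
  have h2 : min n 10 = 10 := Nat.min_eq_right hn
  have e1 : (10:Nat) ^ (tl+1) = 10 ^ tl * 10 := pow_succ 10 tl
  have e2 : (10:Nat) ^ (tl+1+1) = 10 ^ tl * 10 * 10 := by rw [pow_succ, pow_succ]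
  have e3 : (10:Nat) ^ (tl+1+1+1) = 10 ^ tl * 10 * 10 * 10 := by rw [pow_succ, pow_succ, pow_succ]
  rw [h1, h2, e1, e2, e3]
  exact pvArithBack (10 ^ tl) (pvStackVal done') (min pd 9)

-- the three decrease facts for pvLoop, as standalone lemmas (keeps the inline
-- termination proofs small)
theorem pvLoop_dec_back (todo' : List (Nat × Nat)) (done' : List ((Nat × Nat) × Nat))
    (p c : Nat × Nat) (pd n : Nat) (h9 : n > 9) :
    Prod.Lex (· < ·) (· < ·)
      (10 ^ ((p :: c :: todo').length + done'.length + 2) - pvNu (p :: c :: todo').length done' (pd + 1),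
        done'.length)
      (10 ^ ((c :: todo').length + ((p, pd) :: done').length + 2) - pvNu (c :: todo').length ((p, pd) :: done') n,
        ((p, pd) :: done').length) := by
  show Prod.Lex (· < ·) (· < ·)
      (10 ^ (todo'.length + 1 + 1 + done'.length + 2) - pvNu (todo'.length + 1 + 1) done' (pd + 1),
        done'.length)
      (10 ^ (todo'.length + 1 + (done'.length + 1) + 2) - pvNu (todo'.length + 1) ((p, pd) :: done') n,
        done'.length + 1)
  apply Prod.Lex.right'
  · have hE : todo'.length + 1 + 1 + done'.length + 2 = todo'.length + 1 + (done'.length + 1) + 2 := by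
      rw [Nat.add_succ (todo'.length+1) done'.length, Nat.add_right_comm (todo'.length+1) 1 done'.length]
    rw [hE, pvNu_backtrack todo'.length done' p pd n h9]
  · exact Nat.lt_succ_self _

theorem pvLoop_dec_succ (todo' : List (Nat × Nat)) (done : List ((Nat × Nat) × Nat))
    (c : Nat × Nat) (n : Nat) (h9 : ¬ n > 9) :
    Prod.Lex (· < ·) (· < ·)
      (10 ^ (todo'.length + ((c, n) :: done).length + 2) - pvNu todo'.length ((c, n) :: done) 1,
        ((c, n) :: done).length)
      (10 ^ ((c :: todo').length + done.length + 2) - pvNu (c :: todo').length done n,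
        done.length) := by
  show Prod.Lex (· < ·) (· < ·)
      (10 ^ (todo'.length + (done.length + 1) + 2) - pvNu todo'.length ((c, n) :: done) 1,
        done.length + 1)
      (10 ^ (todo'.length + 1 + done.length + 2) - pvNu (todo'.length + 1) done n,
        done.length)
  apply Prod.Lex.left
  have hb := pvNu_le todo'.length ((c, n) :: done) 1
  have hE : todo'.length + ((c, n) :: done).length + 2 = todo'.length + 1 + done.length + 2 := by
    show todo'.length + (done.length + 1) + 2 = todo'.length + 1 + done.length + 2
    rw [Nat.add_succ todo'.length done.length, Nat.add_right_comm todo'.length 1 done.length]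
  rw [hE] at hb
  have hE2 : todo'.length + (done.length + 1) + 2 = todo'.length + 1 + done.length + 2 := by
    rw [Nat.add_succ todo'.length done.length, Nat.add_right_comm todo'.length 1 done.length]
  rw [hE2]
  have hgrow : pvNu (todo'.length + 1) done n + 10 ^ todo'.length
      = pvNu todo'.length ((c, n) :: done) 1 := by
    show min n 10 * 10 ^ (todo'.length + 1) + 10 ^ (todo'.length + 1 + 1) * pvStackVal done
          + 10 ^ todo'.length
        = min 1 10 * 10 ^ todo'.length + 10 ^ (todo'.length + 1) * (min n 9 + 10 * pvStackVal done)
    have hn : min n 10 = n := Nat.min_eq_left (Nat.le_succ_of_le (Nat.le_of_not_lt h9))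
    have hn9 : min n 9 = n := Nat.min_eq_left (Nat.le_of_not_lt h9)
    have h110 : min 1 10 = 1 := rfl
    have e1 : (10:Nat) ^ (todo'.length + 1) = 10 ^ todo'.length * 10 := pow_succ 10 _
    have e2 : (10:Nat) ^ (todo'.length + 1 + 1) = 10 ^ todo'.length * 10 * 10 := by
      rw [pow_succ, pow_succ]
    rw [hn, hn9, h110, e1, e2]
    exact pvArithGrow (10 ^ todo'.length) (pvStackVal done) n
  exact pvArithSubLt _ _ _ _ hgrow hb (Nat.pow_pos (by norm_num : (0:Nat) < 10))

theorem pvLoop_dec_inv (todo' : List (Nat × Nat)) (done : List ((Nat × Nat) × Nat))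
    (c : Nat × Nat) (n : Nat) (h9 : ¬ n > 9) :
    Prod.Lex (· < ·) (· < ·)
      (10 ^ ((c :: todo').length + done.length + 2) - pvNu (c :: todo').length done (n + 1),
        done.length)
      (10 ^ ((c :: todo').length + done.length + 2) - pvNu (c :: todo').length done n,
        done.length) := by
  apply Prod.Lex.left
  have hb := pvNu_le ((c :: todo').length) done (n + 1)
  have hgrow : pvNu ((c :: todo').length) done n + 10 ^ ((c :: todo').length)
      = pvNu ((c :: todo').length) done (n + 1) := by
    show min n 10 * 10 ^ ((c :: todo').length) + 10 ^ ((c :: todo').length + 1) * pvStackVal done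
          + 10 ^ ((c :: todo').length)
        = min (n+1) 10 * 10 ^ ((c :: todo').length) + 10 ^ ((c :: todo').length + 1) * pvStackVal done
    have hn : min n 10 = n := Nat.min_eq_left (Nat.le_succ_of_le (Nat.le_of_not_lt h9))
    have hn1 : min (n + 1) 10 = n + 1 := Nat.min_eq_left (Nat.succ_le_succ (Nat.le_of_not_lt h9))
    rw [hn, hn1]
    exact pvArithGrow2 (10 ^ ((c :: todo').length)) (pvStackVal done) n
  exact pvArithSubLt _ _ _ _ hgrow hb (Nat.pow_pos (by norm_num : (0:Nat) < 10))

set_option maxHeartbeats 1000000 in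
def pvLoop (todo : List (Nat × Nat)) (done : List ((Nat × Nat) × Nat)) (n : Nat)
    (b : List (List Int)) : Option (List (List Int)) :=
  match todo with
  | [] => some b
  | c :: todo' =>
    if n > 9 then
      let b0 := pvPlace c 0 b
      match done with
      | [] => none
      | (p, pd) :: done' => pvLoop (p :: c :: todo') done' (pd+1) b0
    else
      let b' := pvPlace c (n : Int) b
      if pvValid c.1 c.2 b' then pvLoop todo' ((c, n) :: done) 1 b'
      else pvLoop (c :: todo') done (n+1) b'
termination_by (10 ^ (todo.length + done.length + 2) - pvNu todo.length done n, done.length)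
decreasing_by
  · exact pvLoop_dec_back todo' done' p c pd n (by assumption)
  · exact pvLoop_dec_succ todo' done c n (by assumption)
  · exact pvLoop_dec_inv todo' done c n (by assumption)

def solve_alt (board : List (List Int)) : Option (List (List Int)) :=
  pvLoop (pvEmpties board) [] 1 board

-- ===== PRECONDITION & SPEC =====

-- Pre_ excludes boards that contain a zero but are not rectangular with both
-- dimensions multiples of 3: on those shapes Python's valid() can raise IndexError
-- in its column / fixed 3x3 sub-square indexing (A and B call the identical valid()
-- and raise alike there; on a few such shapes the bad index is never reached and A
-- returns — see the cite — but they are outside the solver's natural domain).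
def Pre_solve (board : List (List Int)) : Prop :=
  (∀ r ∈ board, ∀ v ∈ r, v ≠ 0) ∨
  (board.length % 3 = 0 ∧ (board.headD []).length % 3 = 0 ∧
    ∀ r ∈ board, r.length = (board.headD []).length)
instance (board : List (List Int)) : Decidable (Pre_solve board) := by
  unfold Pre_solve; infer_instance

def pvWitness_solve : List (List Int) :=
  [[0, 2, 3, 4, 5, 6, 7, 8, 9], [4, 5, 6, 7, 8, 9, 1, 2, 3], [7, 8, 9, 1, 2, 3, 4, 5, 6],
   [2, 3, 4, 5, 6, 7, 8, 9, 1], [5, 6, 7, 8, 9, 1, 2, 3, 4], [8, 9, 1, 2, 3, 4, 5, 6, 7],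
   [3, 4, 5, 6, 7, 8, 9, 1, 2], [6, 7, 8, 9, 1, 2, 3, 4, 5], [9, 1, 2, 3, 4, 5, 6, 7, 8]]

def Spec_solve (board : List (List Int)) (out : Option (List (List Int))) : Prop := out = solve_alt board
instance (board : List (List Int)) (out : Option (List (List Int))) : Decidable (Spec_solve board out) := by unfold Spec_solve; infer_instance

-- ===== CLAIM (what is proved, stated in full; the proofs are below) =====
def Claim_equal_solve : Prop := ∀ (board : List (List Int)), Dom_solve board → Pre_solve board → Spec_solve board (solve board)

-- ===== LEMMAS AND PROOFS =====

-- ---- list-surgery helpers ----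

theorem pvSetSelf {q : Type} (l : List q) (i : Nat) (a : q) (h : l[i]? = some a) :
    l.set i a = l := by
  apply List.ext_getElem?
  intro k
  rw [List.getElem?_set]
  by_cases hk : i = k
  · subst hk
    rw [if_pos rfl, if_pos]
    · exact h.symm
    · exact (List.getElem?_eq_some_iff.mp h).1
  · rw [if_neg hk]

theorem pvGetDset {q : Type} (l : List q) (i : Nat) (a d : q) (h : i < l.length) :
    (l.set i a).getD i d = a := by
  rw [List.getD_eq_getElem?_getD, List.getElem?_set, if_pos rfl, if_pos h]
  rfl

theorem pvGetDset_ne {q : Type} (l : List q) (i k : Nat) (a d : q) (h : i ≠ k) :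
    (l.set i a).getD k d = l.getD k d := by
  rw [List.getD_eq_getElem?_getD, List.getElem?_set, if_neg h, ← List.getD_eq_getElem?_getD]

-- ---- pvPlace lemmas ----

theorem place_place (c : Nat × Nat) (v w : Int) (b : List (List Int)) :
    pvPlace c v (pvPlace c w b) = pvPlace c v b := by
  unfold pvPlace
  by_cases h : c.1 < b.length
  · have hg : (b.set c.1 ((b.getD c.1 []).set c.2 w)).getD c.1 [] = (b.getD c.1 []).set c.2 w :=
      pvGetDset _ _ _ _ h
    rw [hg, List.set_set, List.set_set]
  · have h' : b.length ≤ c.1 := by omega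
    rw [List.set_eq_of_length_le h', List.set_eq_of_length_le h']

theorem cell_place_self (c : Nat × Nat) (b : List (List Int)) :
    pvCell (pvPlace c 0 b) c.1 c.2 = 0 := by
  unfold pvCell pvPlace
  by_cases h : c.1 < b.length
  · rw [pvGetDset _ _ _ _ h]
    by_cases hj : c.2 < (b.getD c.1 []).length
    · rw [pvGetDset _ _ _ _ hj]
    · rw [List.set_eq_of_length_le (by omega), List.getD_eq_getElem?_getD,
        List.getElem?_eq_none (by omega)]
      rfl
  · have hb : b.getD c.1 [] = [] := by
      rw [List.getD_eq_getElem?_getD, List.getElem?_eq_none (by omega)]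
      rfl
    rw [List.set_eq_of_length_le (by omega), hb]
    rfl

theorem cell_place_ne (c c' : Nat × Nat) (v : Int) (b : List (List Int)) (hne : c' ≠ c) :
    pvCell (pvPlace c v b) c'.1 c'.2 = pvCell b c'.1 c'.2 := by
  unfold pvCell pvPlace
  by_cases hi : c.1 = c'.1
  · have hj : c.2 ≠ c'.2 := by
      intro hj; exact hne (Prod.ext hi.symm hj.symm)
    by_cases h : c.1 < b.length
    · rw [← hi, pvGetDset _ _ _ _ h, pvGetDset_ne _ _ _ _ _ hj]
    · rw [List.set_eq_of_length_le (by omega)]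
  · rw [pvGetDset_ne _ _ _ _ _ hi]

theorem place_zero_of_cell_zero (c : Nat × Nat) (b : List (List Int))
    (h : pvCell b c.1 c.2 = 0) : pvPlace c 0 b = b := by
  unfold pvCell at h
  unfold pvPlace
  by_cases hi : c.1 < b.length
  · by_cases hj : c.2 < (b.getD c.1 []).length
    · have hrow : (b.getD c.1 []).set c.2 0 = b.getD c.1 [] := by
        apply pvSetSelf
        rw [List.getElem?_eq_getElem hj]
        rw [List.getD_eq_getElem?_getD, List.getElem?_eq_getElem hj] at h
        simp at h ⊢
        exact h
      rw [hrow]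
      apply pvSetSelf
      rw [List.getElem?_eq_getElem hi]
      rw [List.getD_eq_getElem?_getD, List.getElem?_eq_getElem hi]
      rfl
    · have hrow : (b.getD c.1 []).set c.2 0 = b.getD c.1 [] := List.set_eq_of_length_le (by omega)
      rw [hrow]
      apply pvSetSelf
      rw [List.getElem?_eq_getElem hi]
      rw [List.getD_eq_getElem?_getD, List.getElem?_eq_getElem hi]
      rfl
  · rw [List.set_eq_of_length_le (by omega)]

-- ---- a structural view of pvEmpties ----

def zIdx : List Int → List Nat
  | [] => []
  | v :: t => if v = 0 then 0 :: (zIdx t).map (· + 1) else (zIdx t).map (· + 1)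

def eSpec : List (List Int) → List (Nat × Nat)
  | [] => []
  | r :: t => (zIdx r).map (fun j => ((0:Nat), j)) ++ (eSpec t).map (fun c => (c.1 + 1, c.2))

theorem emptiesRow_eq (row : List Int) :
    ∀ i j, pvEmptiesRow i j row = (zIdx row).map (fun d => (i, j + d)) := by
  induction row with
  | nil => intro i j; rfl
  | cons v t ih =>
    intro i j
    have hshift : ((zIdx t).map (· + 1)).map (fun d => (i, j + d))
        = (zIdx t).map (fun d => (i, (j + 1) + d)) := by
      rw [List.map_map]
      apply List.map_congr_left
      intro d _
      have : j + (d + 1) = j + 1 + d := by omega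
      simp [Function.comp, this]
    by_cases h : v = 0
    · simp only [pvEmptiesRow, zIdx, h, if_true, List.map_cons, hshift, ih]
      norm_num
    · simp only [pvEmptiesRow, zIdx, h, if_false, hshift, ih]

theorem emptiesFrom_eq (rows : List (List Int)) :
    ∀ i, pvEmptiesFrom i rows = (eSpec rows).map (fun c => (c.1 + i, c.2)) := by
  induction rows with
  | nil => intro i; rfl
  | cons r t ih =>
    intro i
    simp only [pvEmptiesFrom, eSpec, List.map_append, List.map_map]
    congr 1
    · rw [emptiesRow_eq]
      apply List.map_congr_left
      intro d _
      simp [Function.comp]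
    · rw [ih (i+1)]
      apply List.map_congr_left
      intro cp _
      simp only [Function.comp_apply]
      have : cp.1 + (i + 1) = cp.1 + 1 + i := by omega
      rw [this]

theorem empties_eq (b : List (List Int)) : pvEmpties b = eSpec b := by
  unfold pvEmpties
  rw [emptiesFrom_eq]
  simp

theorem findFreeRow_eq (row : List Int) :
    ∀ i j, pvFindFreeRow i j row = (pvEmptiesRow i j row).head? := by
  induction row with
  | nil => intro i j; rfl
  | cons v t ih =>
    intro i j
    by_cases h : v = 0 <;> simp [pvFindFreeRow, pvEmptiesRow, h, ih]

theorem findFreeFrom_eq (rows : List (List Int)) :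
    ∀ i, pvFindFreeFrom i rows = (pvEmptiesFrom i rows).head? := by
  induction rows with
  | nil => intro i; rfl
  | cons r t ih =>
    intro i
    simp only [pvFindFreeFrom, pvEmptiesFrom, findFreeRow_eq, List.head?_append, ih]
    cases h : (pvEmptiesRow i 0 r).head? <;> simp [h]

theorem findFree_eq (b : List (List Int)) : pvFindFree b = (pvEmpties b).head? := by
  unfold pvFindFree pvEmpties
  exact findFreeFrom_eq b 0

theorem zIdx_mem (row : List Int) : ∀ j ∈ zIdx row, row.getD j 0 = 0 := by
  induction row with
  | nil => simp [zIdx]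
  | cons v t ih =>
    intro j hj
    by_cases h : v = 0 <;> simp only [zIdx, h, if_true, if_false] at hj
    · rcases List.mem_cons.mp hj with rfl | hj
      · simpa using h
      · obtain ⟨d, hd, rfl⟩ := List.mem_map.mp hj
        simpa using ih d hd
    · obtain ⟨d, hd, rfl⟩ := List.mem_map.mp hj
      simpa using ih d hd

theorem zIdx_nodup (row : List Int) : (zIdx row).Nodup := by
  induction row with
  | nil => simp [zIdx]
  | cons v t ih =>
    by_cases h : v = 0
    · simp only [zIdx, h, if_true, List.nodup_cons]
      exact ⟨by simp, List.Nodup.map (fun a b hab => by omega) ih⟩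
    · simp only [zIdx, h, if_false]
      exact List.Nodup.map (fun a b hab => by omega) ih

theorem zIdx_set (row : List Int) :
    ∀ j rest (n : Int), n ≠ 0 → zIdx row = j :: rest → zIdx (row.set j n) = rest := by
  induction row with
  | nil => intro j rest n hn h; simp [zIdx] at h
  | cons v t ih =>
    intro j rest n hn h
    by_cases hv : v = 0
    · rw [zIdx, if_pos hv] at h
      injection h with h1 h2
      subst h2
      have hj : j = 0 := h1.symm
      subst hj
      simp only [List.set_cons_zero, zIdx, if_neg hn]
    · rw [zIdx, if_neg hv] at h
      cases hz : zIdx t with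
      | nil => rw [hz] at h; simp at h
      | cons jt rt =>
        rw [hz] at h
        simp only [List.map_cons, List.cons.injEq] at h
        obtain ⟨rfl, rfl⟩ := h
        rw [List.set_cons_succ, zIdx, if_neg hv, ih jt rt n hn hz]

theorem eSpec_mem (b : List (List Int)) : ∀ c ∈ eSpec b, pvCell b c.1 c.2 = 0 := by
  induction b with
  | nil => simp [eSpec]
  | cons r t ih =>
    intro c hc
    rcases List.mem_append.mp hc with hl | hr
    · obtain ⟨j, hj, rfl⟩ := List.mem_map.mp hl
      simpa [pvCell] using zIdx_mem r j hj
    · obtain ⟨⟨ci, cj⟩, hcp, rfl⟩ := List.mem_map.mp hr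
      simpa [pvCell] using ih (ci, cj) hcp

theorem eSpec_nodup (b : List (List Int)) : (eSpec b).Nodup := by
  induction b with
  | nil => simp [eSpec]
  | cons r t ih =>
    refine List.Nodup.append ?_ ?_ ?_
    · exact List.Nodup.map (fun a b hab => by simpa using hab) (zIdx_nodup r)
    · exact List.Nodup.map (fun a b hab => by
        obtain ⟨ha1, ha2⟩ := Prod.mk.injEq _ _ _ _ ▸ hab
        exact Prod.ext (by omega) ha2) ih
    · intro a ha hb
      obtain ⟨j, _, rfl⟩ := List.mem_map.mp ha
      obtain ⟨cp, _, hcp⟩ := List.mem_map.mp hb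
      have : cp.1 + 1 = 0 := congrArg Prod.fst hcp
      omega

theorem eSpec_set (b : List (List Int)) :
    ∀ (i j : Nat) rest (n : Int), n ≠ 0 → eSpec b = (i, j) :: rest →
      eSpec (pvPlace (i, j) n b) = rest := by
  induction b with
  | nil => intro i j rest n hn h; simp [eSpec] at h
  | cons r t ih =>
    intro i j rest n hn h
    cases hz : zIdx r with
    | nil =>
      rw [eSpec, hz] at h
      simp only [List.map_nil, List.nil_append] at h
      cases he : eSpec t with
      | nil => rw [he] at h; simp at h
      | cons c0 rt =>
        obtain ⟨ci, cj⟩ := c0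
        rw [he] at h
        simp only [List.map_cons, List.cons.injEq, Prod.mk.injEq] at h
        obtain ⟨⟨h1, rfl⟩, rfl⟩ := h
        subst h1
        have hplace : pvPlace (ci + 1, cj) n (r :: t) = r :: pvPlace (ci, cj) n t := by
          unfold pvPlace
          simp [List.getD_cons_succ, List.set_cons_succ]
        rw [hplace, eSpec, hz, ih ci cj rt n hn he]
        simp
    | cons j0 jr =>
      rw [eSpec, hz] at h
      simp only [List.map_cons, List.cons_append, List.cons.injEq, Prod.mk.injEq] at h
      obtain ⟨⟨h1, h2⟩, h3⟩ := h
      subst h1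
      subst h2
      have hplace : pvPlace (0, j0) n (r :: t) = (r.set j0 n) :: t := by
        unfold pvPlace
        simp [List.getD_cons_zero, List.set_cons_zero]
      rw [hplace, eSpec, zIdx_set r j0 jr n hn hz, ← h3]

theorem empties_place (b : List (List Int)) (c : Nat × Nat) (rest : List (Nat × Nat))
    (n : Int) (hn : n ≠ 0) (h : pvEmpties b = c :: rest) :
    pvEmpties (pvPlace c n b) = rest := by
  rw [empties_eq] at h ⊢
  exact eSpec_set b c.1 c.2 rest n hn (by rw [← h])

-- ---- the common reference solver (proof-only) ----

mutual
def goR : List (Nat × Nat) → List (List Int) → Option (List (List Int))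
  | [], b => some b
  | c :: todo', b => tryR c todo' b 1
termination_by todo _ => (todo.length, 10)

def tryR (c : Nat × Nat) (todo : List (Nat × Nat)) (b : List (List Int)) (n : Nat) :
    Option (List (List Int)) :=
  if n > 9 then none
  else
    let b' := pvPlace c (n : Int) b
    if pvValid c.1 c.2 b' then
      match goR todo b' with
      | some s => some s
      | none => tryR c todo b' (n+1)
    else tryR c todo b' (n+1)
termination_by (todo.length + 1, 10 - n)
end

theorem digitsA_eq (f : Nat)
    (IH : ∀ b', (pvEmpties b').length < f → pvSolveFuel f b' = goR (pvEmpties b') b')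
    (i j : Nat) (rest : List (Nat × Nat)) (hrest : rest.length < f) :
    ∀ (d n : Nat) (b : List (List Int)), 10 - n = d → 1 ≤ n →
      (∀ m : Nat, m ≠ 0 → pvEmpties (pvPlace (i, j) (m : Int) b) = rest) →
      pvDigitsA f b i j n = tryR (i, j) rest b n := by
  intro d
  induction d with
  | zero =>
    intro n b h10 h1 hm
    have h9 : n > 9 := by omega
    rw [pvDigitsA, tryR, if_pos h9, if_pos h9]
  | succ d ihd =>
    intro n b h10 h1 hm
    have h9 : ¬ n > 9 := by omega
    rw [pvDigitsA, tryR, if_neg h9, if_neg h9]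
    simp only
    have hemp : pvEmpties (pvPlace (i, j) (n : Int) b) = rest := by
      exact hm n (by omega)
    have hm' : ∀ m : Nat, m ≠ 0 →
        pvEmpties (pvPlace (i, j) (m : Int) (pvPlace (i, j) (n : Int) b)) = rest := by
      intro m hm0
      rw [place_place]
      exact hm m hm0
    have hsf : pvSolveFuel f (pvPlace (i, j) (n : Int) b) =
        goR rest (pvPlace (i, j) (n : Int) b) := by
      rw [IH _ (by rw [hemp]; exact hrest), hemp]
    by_cases hv : pvValid i j (pvPlace (i, j) (n : Int) b)
    · rw [if_pos hv, if_pos hv, hsf]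
      cases hg : goR rest (pvPlace (i, j) (n : Int) b) with
      | some s => rfl
      | none => exact ihd (n+1) _ (by omega) (by omega) hm'
    · rw [if_neg hv, if_neg hv]
      exact ihd (n+1) _ (by omega) (by omega) hm'

theorem solveFuel_eq :
    ∀ (fuel : Nat) (b : List (List Int)), (pvEmpties b).length < fuel →
      pvSolveFuel fuel b = goR (pvEmpties b) b := by
  intro fuel
  induction fuel with
  | zero => intro b h; omega
  | succ f ihf =>
    intro b h
    rw [pvSolveFuel, findFree_eq]
    cases he : pvEmpties b with
    | nil => simp [goR]
    | cons c rest =>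
      obtain ⟨i, j⟩ := c
      simp only [List.head?_cons]
      rw [goR]
      apply digitsA_eq f ihf i j rest ?_ 9 1 b rfl (by omega)
      · intro m hm0
        exact empties_place b (i, j) rest (m : Int) (by exact_mod_cast hm0) he
      · rw [he] at h
        simp only [List.length_cons] at h
        omega

-- denotation of the machine's stack: what runs after the current subtree fails
def Kres : List ((Nat × Nat) × Nat) → List (Nat × Nat) → List (List Int) →
    Option (List (List Int))
  | [], _, _ => none
  | (p, pd) :: done', todo, b =>
    match tryR p todo b (pd+1) with
    | some s => some s
    | none => Kres done' (p :: todo) (pvPlace p 0 b)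

def Mden : List (Nat × Nat) → List ((Nat × Nat) × Nat) → Nat → List (List Int) →
    Option (List (List Int))
  | [], _, _, b => some b
  | c :: todo', done, n, b =>
    match tryR c todo' b n with
    | some s => some s
    | none => Kres done (c :: todo') (pvPlace c 0 b)

theorem loop_eq (todo : List (Nat × Nat)) (done : List ((Nat × Nat) × Nat)) (n : Nat)
    (b : List (List Int)) :
    ((done.map Prod.fst ++ todo).Nodup) →
    (∀ c' ∈ todo.tail, pvCell b c'.1 c'.2 = 0) →
    pvLoop todo done n b = Mden todo done n b := by
  induction todo, done, n, b using pvLoop.induct with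
  | case1 done n b =>
    intro _ _
    rw [pvLoop]
    rfl
  | case2 n b c todo' h9 =>
    intro h1 h2
    rw [pvLoop]
    have ht : tryR c todo' b n = none := by rw [tryR, if_pos h9]
    simp [Mden, ht, Kres, h9]
  | case3 n b c todo' h9 b0 p pd done' ih =>
    intro h1 h2
    have hnd : (c :: todo').Nodup := h1.of_append_right
    have h1' : ((done'.map Prod.fst ++ (p :: c :: todo')).Nodup) := by
      have hperm := List.perm_middle (a := p) (l₁ := done'.map Prod.fst) (l₂ := c :: todo')
      rw [hperm.nodup_iff]
      simpa using h1
    have hcpv : ∀ c' ∈ (c :: todo'), pvCell (pvPlace c 0 b) c'.1 c'.2 = 0 := by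
      intro c' hc'
      rcases List.mem_cons.mp hc' with rfl | hc'
      · exact cell_place_self _ _
      · have hne : c' ≠ c := fun he => (List.nodup_cons.mp hnd).1 (he ▸ hc')
        rw [cell_place_ne c c' 0 b hne]
        exact h2 c' hc'
    have hIH := ih h1' (fun c' hc' => hcpv c' hc')
    rw [pvLoop]
    have ht : tryR c todo' b n = none := by rw [tryR, if_pos h9]
    simp only [if_pos h9]
    rw [hIH]
    have hb0 : b0 = pvPlace c 0 b := rfl
    cases hx : tryR p (c :: todo') (pvPlace c 0 b) (pd + 1) <;>
      simp [Mden, ht, Kres, hx, hb0]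
  | case4 done n b c todo' h9 b' hv ih =>
    intro h1 h2
    have hnd : (c :: todo').Nodup := h1.of_append_right
    have hnotin : c ∉ todo' := (List.nodup_cons.mp hnd).1
    have hb' : b' = pvPlace c (n : Int) b := rfl
    rw [hb'] at hv ih
    have h1' : ((((c, n) :: done).map Prod.fst ++ todo').Nodup) := by
      have hperm := List.perm_middle (a := c) (l₁ := done.map Prod.fst) (l₂ := todo')
      simp only [List.map_cons, List.cons_append]
      exact (hperm.nodup_iff).mp h1
    have h2' : ∀ c' ∈ todo'.tail, pvCell (pvPlace c (n : Int) b) c'.1 c'.2 = 0 := by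
      intro c' hc'
      have hmem : c' ∈ todo' := List.mem_of_mem_tail hc'
      have hne : c' ≠ c := fun he => hnotin (he ▸ hmem)
      rw [cell_place_ne c c' _ b hne]
      exact h2 c' hmem
    have hIH := ih h1' h2'
    rw [pvLoop]
    simp only [if_neg h9, hv, if_true]
    rw [hIH]
    have ht : tryR c todo' b n = (match goR todo' (pvPlace c (n : Int) b) with
        | some s => some s
        | none => tryR c todo' (pvPlace c (n : Int) b) (n + 1)) := by
      rw [tryR]
      simp [h9, hv]
    cases htodo : todo' with
    | nil =>
      subst htodo
      have hgoR : goR [] (pvPlace c (n : Int) b) = some (pvPlace c (n : Int) b) := by rw [goR]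
      simp [Mden, ht, hgoR]
    | cons c2 todo'' =>
      subst htodo
      have hgoR : goR (c2 :: todo'') (pvPlace c (n : Int) b)
          = tryR c2 todo'' (pvPlace c (n : Int) b) 1 := by rw [goR]
      have hc2mem : c2 ∈ c2 :: todo'' := by simp
      have hc2 : pvCell (pvPlace c (n : Int) b) c2.1 c2.2 = 0 := by
        have hne : c2 ≠ c := fun he => hnotin (he ▸ hc2mem)
        rw [cell_place_ne c c2 _ b hne]
        exact h2 c2 hc2mem
      have hreset : pvPlace c2 0 (pvPlace c (n : Int) b) = pvPlace c (n : Int) b :=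
        place_zero_of_cell_zero c2 _ hc2
      have hpp : pvPlace c 0 (pvPlace c (n : Int) b) = pvPlace c 0 b := place_place c 0 _ b
      cases hx : tryR c2 todo'' (pvPlace c (n : Int) b) 1 with
      | some s => simp [Mden, ht, hgoR, hx]
      | none =>
        cases hy : tryR c (c2 :: todo'') (pvPlace c (n : Int) b) (n + 1) <;>
          simp [Mden, ht, hgoR, hx, hy, Kres, hreset, hpp]
  | case5 done n b c todo' h9 b' hnv ih =>
    intro h1 h2
    have hnd : (c :: todo').Nodup := h1.of_append_right
    have hnotin : c ∉ todo' := (List.nodup_cons.mp hnd).1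
    have hb' : b' = pvPlace c (n : Int) b := rfl
    rw [hb'] at hnv ih
    have h2' : ∀ c' ∈ (c :: todo').tail, pvCell (pvPlace c (n : Int) b) c'.1 c'.2 = 0 := by
      intro c' hc'
      have hne : c' ≠ c := fun he => hnotin (he ▸ hc')
      rw [cell_place_ne c c' _ b hne]
      exact h2 c' hc'
    have hIH := ih h1 h2'
    rw [pvLoop]
    simp only [if_neg h9, hnv, if_false]
    rw [hIH]
    have ht : tryR c todo' b n = tryR c todo' (pvPlace c (n : Int) b) (n + 1) := by
      rw [tryR]
      simp [h9, hnv]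
    have hpp : pvPlace c 0 (pvPlace c (n : Int) b) = pvPlace c 0 b := place_place c 0 _ b
    cases hx : tryR c todo' (pvPlace c (n : Int) b) (n + 1) <;>
      simp [Mden, ht, hx, Kres, hpp]

theorem alt_eq (b : List (List Int)) : solve_alt b = goR (pvEmpties b) b := by
  unfold solve_alt
  have hnd : ((([] : List ((Nat × Nat) × Nat)).map Prod.fst ++ pvEmpties b).Nodup) := by
    simp only [List.map_nil, List.nil_append]
    rw [empties_eq]
    exact eSpec_nodup b
  have hz : ∀ c' ∈ (pvEmpties b).tail, pvCell b c'.1 c'.2 = 0 := by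
    intro c' hc'
    have hm : c' ∈ pvEmpties b := List.mem_of_mem_tail hc'
    rw [empties_eq] at hm
    exact eSpec_mem b c' hm
  rw [loop_eq _ _ _ _ hnd hz]
  cases he : pvEmpties b with
  | nil =>
    have hgoR : goR [] b = some b := by rw [goR]
    simp [Mden, hgoR]
  | cons c rest =>
    have hgoR : goR (c :: rest) b = tryR c rest b 1 := by rw [goR]
    cases hx : tryR c rest b 1 <;> simp [Mden, hx, Kres, hgoR]

-- ===== VERDICT (by name: the statement is the Claim_ definition above) =====
theorem solve_spec : Claim_equal_solve := by
  intro board _hdom _hpre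
  unfold Spec_solve
  have hA : solve board = goR (pvEmpties board) board := by
    unfold solve
    exact solveFuel_eq _ _ (by omega)
  rw [hA, alt_eq]
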